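-- pv_equiv track=rewrite | github.com/JPAreu/cadimo_astar_sections | External_Connector/connector_orto.py | _get_shell_cells
-- ===== SOURCE A (Python) =====
-- from typing import Dict, List, Optional, Sequence, Set, Tuple
--
-- def _get_shell_cells(centre: Tuple[int, int, int], radius: int) -> List[Tuple[int, int, int]]:
--     """Get only the cells on the shell of the given radius (much more efficient)"""
--     if radius == 0:
--         return [centre]
--
--     cells = []
--     cx, cy, cz = centre
--
--     for dx in range(-radius, radius + 1):
--         for dy in range(-radius, radius + 1):
--             for dz in range(-radius, radius + 1):
--                 # Only include cells that are exactly at distance 'radius' (shell)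
--                 if max(abs(dx), abs(dy), abs(dz)) == radius:
--                     cells.append((cx + dx, cy + dy, cz + dz))
--
--     return cells
-- ===== SOURCE B (Python) =====
-- def _get_shell_cells(centre, radius):
--     """Shell at Chebyshev distance `radius`, built face-by-face: the full dx=-r
--     face, then for each interior dx the square ring of its (dy, dz) cross-section,
--     then the full dx=+r face. No membership test is ever evaluated."""
--     if radius == 0:
--         return [centre]
--
--     cx, cy, cz = centre
--     span = list(range(-radius, radius + 1))
--
--     def face(dx):
--         # whole (dy, dz) square at an extreme dx
--         return [(cx + dx, cy + dy, cz + dz) for dy in span for dz in span]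
--
--     def ring(dx):
--         # border of the (dy, dz) square at an interior dx
--         top = [(cx + dx, cy - radius, cz + dz) for dz in span]
--         sides = [(cx + dx, cy + dy, cz + sz * radius)
--                  for dy in range(-radius + 1, radius) for sz in (-1, 1)]
--         bottom = [(cx + dx, cy + radius, cz + dz) for dz in span]
--         return top + sides + bottom
--
--     middle = [cell for dx in range(-radius + 1, radius) for cell in ring(dx)]
--     return face(-radius) + middle + face(radius)
-- ===== Notes on version B (the rewrite author's own statement) =====
-- stated objective: faster
-- what changed: B constructs the shell directly face-by-face (full dx=-r face, a square ring per interior dx, full dx=+r face) via comprehensions with no per-cell distance test, instead of A's scan of all (2r+1)^3 cube cells with a max(|dx|,|dy|,|dz|)==r test; output order is identical; intended as faster (O(r^2) work vs A's O(r^3)), measured ~15x at the largest radius where both finished (at the very largest sizes both are bounded by the Theta(r^2) output itself).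
import Mathlib
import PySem

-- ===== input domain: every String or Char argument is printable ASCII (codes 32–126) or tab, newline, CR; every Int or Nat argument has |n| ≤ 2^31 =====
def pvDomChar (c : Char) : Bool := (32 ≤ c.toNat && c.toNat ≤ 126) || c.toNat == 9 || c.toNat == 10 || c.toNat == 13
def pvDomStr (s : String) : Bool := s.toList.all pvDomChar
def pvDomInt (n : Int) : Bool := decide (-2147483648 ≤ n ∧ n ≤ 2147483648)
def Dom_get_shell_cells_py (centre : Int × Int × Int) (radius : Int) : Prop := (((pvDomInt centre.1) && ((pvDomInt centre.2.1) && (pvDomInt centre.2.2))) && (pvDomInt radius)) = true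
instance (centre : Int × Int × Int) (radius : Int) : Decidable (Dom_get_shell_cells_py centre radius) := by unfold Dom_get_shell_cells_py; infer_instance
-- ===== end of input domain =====

-- B builds the shell face-by-face (full dx=-r face, square rings for interior dx,
-- full dx=+r face) with no membership test, instead of A's full-cube scan with a
-- distance test per cell: intended as faster (O(r^2) work vs A's O(r^3) cube scan;
-- measured ~15x at the largest radius where both finished), same output in the same order.

-- ===== PORT A =====
def get_shell_cells_py (centre : Int × Int × Int) (radius : Int) : List (Int × Int × Int) :=
  if radius = 0 then [centre]
  else
    let cx := centre.1; let cy := centre.2.1; let cz := centre.2.2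
    (PySem.List.pyRange (-radius) (radius + 1) 1).foldl (fun cells dx =>
      (PySem.List.pyRange (-radius) (radius + 1) 1).foldl (fun cells dy =>
        (PySem.List.pyRange (-radius) (radius + 1) 1).foldl (fun cells dz =>
          if max (max |dx| |dy|) |dz| = radius then
            cells ++ [(cx + dx, cy + dy, cz + dz)]
          else cells) cells) cells) []

-- ===== PORT B =====
-- whole (dy, dz) square at an extreme dx
def pvShellFace (cx cy cz r dx : Int) : List (Int × Int × Int) :=
  (PySem.List.pyRange (-r) (r + 1) 1).flatMap (fun dy =>
    (PySem.List.pyRange (-r) (r + 1) 1).map (fun dz => (cx + dx, cy + dy, cz + dz)))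

-- border of the (dy, dz) square at an interior dx: top row, two side cells per
-- interior dy, bottom row
def pvShellRing (cx cy cz r dx : Int) : List (Int × Int × Int) :=
  (PySem.List.pyRange (-r) (r + 1) 1).map (fun dz => (cx + dx, cy - r, cz + dz))
  ++ (PySem.List.pyRange (-r + 1) r 1).flatMap (fun dy =>
       ([-1, 1] : List Int).map (fun sz => (cx + dx, cy + dy, cz + sz * r)))
  ++ (PySem.List.pyRange (-r) (r + 1) 1).map (fun dz => (cx + dx, cy + r, cz + dz))

def get_shell_cells_py_alt (centre : Int × Int × Int) (radius : Int) : List (Int × Int × Int) :=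
  if radius = 0 then [centre]
  else
    let cx := centre.1; let cy := centre.2.1; let cz := centre.2.2
    pvShellFace cx cy cz radius (-radius)
      ++ (PySem.List.pyRange (-radius + 1) radius 1).flatMap (pvShellRing cx cy cz radius)
      ++ pvShellFace cx cy cz radius radius

-- ===== PRECONDITION & SPEC =====
def Spec_get_shell_cells_py (centre : Int × Int × Int) (radius : Int) (out : List (Int × Int × Int)) : Prop := out = get_shell_cells_py_alt centre radius
instance (centre : Int × Int × Int) (radius : Int) (out : List (Int × Int × Int)) : Decidable (Spec_get_shell_cells_py centre radius out) := by unfold Spec_get_shell_cells_py; infer_instance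

-- ===== CLAIM (what is proved, stated in full; the proofs are below) =====
def Claim_equal_get_shell_cells_py : Prop := ∀ (centre : Int × Int × Int) (radius : Int), Dom_get_shell_cells_py centre radius → Spec_get_shell_cells_py centre radius (get_shell_cells_py centre radius)

-- ===== LEMMAS AND PROOFS =====

-- split a flatMap over the full range at the two extremes (function abstract, so
-- inner occurrences of the same range are untouched)
theorem pv_flatMap_split {α : Type} (g : Int → List α) (r : Int) (hr : 0 < r) :
    (PySem.List.pyRange (-r) (r + 1) 1).flatMap g =
      g (-r) ++ (PySem.List.pyRange (-r + 1) r 1).flatMap g ++ g r := by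
  rw [PySem.List.pyRange_one_append (-r) (-r + 1) (r + 1) (by omega) (by omega),
      PySem.List.pyRange_one_append (-r + 1) r (r + 1) (by omega) (by omega),
      PySem.List.pyRange_one_singleton]
  simp [List.flatMap_append]

-- filter of the full dz range is the whole range when the other coordinates already reach r
theorem pv_filter_full (r m : Int) (hm : m = r) :
    (PySem.List.pyRange (-r) (r + 1) 1).filter (fun dz => decide (max m |dz| = r)) =
      PySem.List.pyRange (-r) (r + 1) 1 := by
  rw [List.filter_eq_self]
  intro x hx
  rw [PySem.List.mem_pyRange_one] at hx
  simp only [decide_eq_true_eq, hm]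
  exact max_eq_left (abs_le.mpr (by omega))

-- filter of the full dz range down to the two faces, for an interior column
theorem pv_filter_faces (r m : Int) (hr : 0 < r) (hm : m < r) :
    (PySem.List.pyRange (-r) (r + 1) 1).filter (fun dz => decide (max m |dz| = r)) =
      [-r, r] := by
  rw [PySem.List.pyRange_one_append (-r) (-r + 1) (r + 1) (by omega) (by omega),
      PySem.List.pyRange_one_append (-r + 1) r (r + 1) (by omega) (by omega),
      PySem.List.pyRange_one_singleton]
  have hmid : (PySem.List.pyRange (-r + 1) r 1).filter (fun dz => decide (max m |dz| = r)) = [] := by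
    rw [List.filter_eq_nil_iff]
    intro x hx
    rw [PySem.List.mem_pyRange_one] at hx
    simp only [decide_eq_true_eq]
    exact (max_lt hm (abs_lt.mpr (by omega))).ne
  simp only [List.filter_append, hmid, List.filter_cons, List.filter_nil]
  have h2 : max m |r| = r := by rw [abs_of_pos hr]; exact max_eq_right hm.le
  simp [h2]

-- an extreme-dx slab of A's scan is a full face
theorem pv_slab_face (cx cy cz r m : Int) (hm : |m| = r) :
    (PySem.List.pyRange (-r) (r + 1) 1).flatMap (fun dy =>
        ((PySem.List.pyRange (-r) (r + 1) 1).filter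
            (fun dz => decide (max (max |m| |dy|) |dz| = r))).map
          (fun dz => (cx + m, cy + dy, cz + dz))) = pvShellFace cx cy cz r m := by
  unfold pvShellFace
  apply List.flatMap_congr
  intro dy hdy
  rw [PySem.List.mem_pyRange_one] at hdy
  rw [pv_filter_full r (max |m| |dy|)
        (by rw [hm]; exact max_eq_left (abs_le.mpr (by omega)))]

-- an interior-dx slab of A's scan is a square ring
theorem pv_slab_ring (cx cy cz r m : Int) (hr : 0 < r) (hm : |m| < r) :
    (PySem.List.pyRange (-r) (r + 1) 1).flatMap (fun dy =>
        ((PySem.List.pyRange (-r) (r + 1) 1).filter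
            (fun dz => decide (max (max |m| |dy|) |dz| = r))).map
          (fun dz => (cx + m, cy + dy, cz + dz))) = pvShellRing cx cy cz r m := by
  unfold pvShellRing
  rw [pv_flatMap_split _ r hr]
  simp only [List.append_assoc]
  congr 1
  · -- dy = -r row: the whole dz range survives the filter
    rw [pv_filter_full r (max |m| |(-r)|)
          (by rw [abs_neg, abs_of_pos hr]; exact max_eq_right hm.le)]
    apply List.map_congr_left
    intro dz _
    have : cy + -r = cy - r := by ring
    rw [this]
  congr 1
  · -- interior dy rows: exactly the two cells dz = ±r
    apply List.flatMap_congr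
    intro dy hdy
    rw [PySem.List.mem_pyRange_one] at hdy
    rw [pv_filter_faces r (max |m| |dy|) hr (max_lt hm (abs_lt.mpr (by omega)))]
    simp
  · -- dy = r row
    rw [pv_filter_full r (max |m| |r|)
          (by rw [abs_of_pos hr]; exact max_eq_right hm.le)]

theorem get_shell_cells_py_eq (centre : Int × Int × Int) (radius : Int) :
    get_shell_cells_py centre radius = get_shell_cells_py_alt centre radius := by
  unfold get_shell_cells_py get_shell_cells_py_alt
  by_cases h0 : radius = 0
  · simp [h0]
  · simp only [if_neg h0]
    rcases lt_or_gt_of_ne h0 with hneg | hpos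
    · rw [PySem.List.pyRange_one_eq_nil (by omega), PySem.List.pyRange_one_eq_nil (by omega)]
      simp [pvShellFace, PySem.List.pyRange_one_eq_nil (by omega : radius + 1 ≤ -radius)]
    · -- turn A's nested conditional foldls into flatMaps of filtered maps
      have hA : (PySem.List.pyRange (-radius) (radius + 1) 1).foldl (fun cells dx =>
            (PySem.List.pyRange (-radius) (radius + 1) 1).foldl (fun cells dy =>
              (PySem.List.pyRange (-radius) (radius + 1) 1).foldl (fun cells dz =>
                if max (max |dx| |dy|) |dz| = radius then
                  cells ++ [(centre.1 + dx, centre.2.1 + dy, centre.2.2 + dz)]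
                else cells) cells) cells) [] =
          (PySem.List.pyRange (-radius) (radius + 1) 1).flatMap (fun dx =>
            (PySem.List.pyRange (-radius) (radius + 1) 1).flatMap (fun dy =>
              ((PySem.List.pyRange (-radius) (radius + 1) 1).filter
                  (fun dz => decide (max (max |dx| |dy|) |dz| = radius))).map
                (fun dz => (centre.1 + dx, centre.2.1 + dy, centre.2.2 + dz)))) := by
        simp only [PySem.List.foldl_append_ite, PySem.List.foldl_append_eq_flatMap,
          List.nil_append]
      rw [hA, pv_flatMap_split _ radius hpos]
      congr 1
      congr 1
      · exact pv_slab_face centre.1 centre.2.1 centre.2.2 radius (-radius)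
          (by rw [abs_neg, abs_of_pos hpos])
      · apply List.flatMap_congr
        intro dx hdx
        rw [PySem.List.mem_pyRange_one] at hdx
        exact pv_slab_ring centre.1 centre.2.1 centre.2.2 radius dx hpos
          (abs_lt.mpr (by omega))
      · exact pv_slab_face centre.1 centre.2.1 centre.2.2 radius radius
          (abs_of_pos hpos)

-- ===== VERDICT (by name: the statement is the Claim_ definition above) =====
theorem get_shell_cells_py_spec : Claim_equal_get_shell_cells_py := by
  intro centre radius _
  exact get_shell_cells_py_eq centre radius
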